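-- pv_equiv track=rewrite | github.com/searchbb/knowledge-fabric | backend/app/services/workspace/concept_view_service.py | _sample_evidence_for_candidate
-- ===== SOURCE A (Python) =====
-- from typing import Any
--
-- def _sample_evidence_for_candidate(
--     group_nodes: list[dict[str, Any]],
--     adjacency: dict[str, list[str]],
-- ) -> list[str]:
--     evidence: list[str] = []
--     for node in group_nodes:
--         summary = str(node.get("summary") or "").strip()
--         if summary:
--             evidence.append(summary)
--         for neighbor_name in adjacency.get(str(node.get("uuid")), []):
--             if neighbor_name:
--                 evidence.append(f"关联节点：{neighbor_name}")
--
--     unique: list[str] = []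
--     seen = set()
--     for item in evidence:
--         if item in seen:
--             continue
--         seen.add(item)
--         unique.append(item)
--     return unique[:3]
-- ===== SOURCE B (Python) =====
-- def _sample_evidence_for_candidate(group_nodes, adjacency):
--     seen = set()
--     result = []
--     for node in group_nodes:
--         summary = str(node.get("summary") or "").strip()
--         candidates = ([summary] if summary else []) + [
--             f"关联节点：{n}" for n in adjacency.get(str(node.get("uuid")), []) if n
--         ]
--         for c in candidates:
--             if c not in seen:
--                 seen.add(c)
--                 result.append(c)
--                 if len(result) == 3:
--                     return result
--     return result
-- ===== Notes on version B (the rewrite author's own statement) =====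
-- stated objective: simpler
-- what changed: B fuses A's two passes (collect all evidence, then dedup, then slice [:3]) into a single deduplicating loop that returns as soon as 3 unique items are collected, never materialising the full evidence list.
import Mathlib
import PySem

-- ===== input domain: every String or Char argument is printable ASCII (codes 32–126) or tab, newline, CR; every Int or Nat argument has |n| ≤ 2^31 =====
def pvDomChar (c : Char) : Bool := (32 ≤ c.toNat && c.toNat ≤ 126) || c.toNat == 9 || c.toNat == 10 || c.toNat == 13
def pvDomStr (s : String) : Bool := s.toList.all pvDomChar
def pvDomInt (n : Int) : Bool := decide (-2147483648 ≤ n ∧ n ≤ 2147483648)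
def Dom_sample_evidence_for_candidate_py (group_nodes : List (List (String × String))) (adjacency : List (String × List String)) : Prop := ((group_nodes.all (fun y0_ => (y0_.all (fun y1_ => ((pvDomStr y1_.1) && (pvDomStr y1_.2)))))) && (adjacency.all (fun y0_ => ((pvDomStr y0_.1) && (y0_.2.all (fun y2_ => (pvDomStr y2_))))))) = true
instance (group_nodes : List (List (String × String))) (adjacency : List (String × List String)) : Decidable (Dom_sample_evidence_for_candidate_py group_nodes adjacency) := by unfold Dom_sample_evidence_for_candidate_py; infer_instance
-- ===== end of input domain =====

-- B fuses A's collect-all pass, dedup pass and final [:3] slice into one deduplicating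
-- loop that returns as soon as 3 unique evidence strings are found (objective: simpler).

-- shared expression helpers (the same Python expressions appear in A and B):
-- summary = str(node.get("summary") or "").strip()
def pvSummary (node : List (String × String)) : String :=
  PySem.Str.strip (match (PySem.Dict.mk node).get? "summary" with
    | some s => if s == "" then "" else s      -- `or ""`: falsy value replaced by ""
    | none => "")
-- str(node.get("uuid")) : a missing key gives the string "None"
def pvKey (node : List (String × String)) : String :=
  match (PySem.Dict.mk node).get? "uuid" with
  | some s => s
  | none => "None"

-- ===== PORT A =====
def sample_evidence_for_candidate_py (group_nodes : List (List (String × String))) (adjacency : List (String × List String)) : List String :=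
  -- evidence-collection loop
  let evidence : List String := group_nodes.foldl (fun ev node =>
    let summary := pvSummary node
    let ev := if summary ≠ "" then ev ++ [summary] else ev
    ((PySem.Dict.mk adjacency).getD (pvKey node) []).foldl (fun e n =>
      if n ≠ "" then e ++ ["关联节点：" ++ n] else e) ev) []
  -- dedup pass
  let unique := (evidence.foldl (fun (p : List String × PySem.Set String) item =>
    if PySem.Set.contains p.2 item then p
    else (p.1 ++ [item], PySem.Set.add p.2 item)) ([], PySem.Set.empty)).1
  -- unique[:3]
  PySem.List.slice unique none (some 3)

-- ===== PORT B =====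
-- candidates = ([summary] if summary else []) + [f"关联节点：{n}" for n in adjacency.get(str(node.get("uuid")), []) if n]
def pvCandidates (node : List (String × String)) (adjacency : List (String × List String)) : List String :=
  (if pvSummary node ≠ "" then [pvSummary node] else [])
    ++ (((PySem.Dict.mk adjacency).getD (pvKey node) []).filter (fun n => n ≠ "")).map
        (fun n => "关联节点：" ++ n)

-- inner loop: dedup candidates into (result, seen); flag true = len(result) hit 3 (early return)
def pvTake3 (cands : List String) (seen : PySem.Set String) (res : List String) :
    List String × PySem.Set String × Bool :=
  match cands with
  | [] => (res, seen, false)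
  | c :: rest =>
    if PySem.Set.contains seen c then pvTake3 rest seen res
    else
      if (res ++ [c]).length = 3 then (res ++ [c], PySem.Set.add seen c, true)
      else pvTake3 rest (PySem.Set.add seen c) (res ++ [c])

-- outer loop over the nodes; propagates the early return
def pvLoopB (nodes : List (List (String × String))) (adjacency : List (String × List String))
    (seen : PySem.Set String) (res : List String) : List String :=
  match nodes with
  | [] => res
  | node :: rest =>
    match pvTake3 (pvCandidates node adjacency) seen res with
    | (res', _, true) => res'
    | (res', seen', false) => pvLoopB rest adjacency seen' res'

def sample_evidence_for_candidate_py_alt (group_nodes : List (List (String × String))) (adjacency : List (String × List String)) : List String :=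
  pvLoopB group_nodes adjacency PySem.Set.empty []

-- ===== PRECONDITION & SPEC =====
def Spec_sample_evidence_for_candidate_py (group_nodes : List (List (String × String))) (adjacency : List (String × List String)) (out : List String) : Prop := out = sample_evidence_for_candidate_py_alt group_nodes adjacency
instance (group_nodes : List (List (String × String))) (adjacency : List (String × List String)) (out : List String) : Decidable (Spec_sample_evidence_for_candidate_py group_nodes adjacency out) := by unfold Spec_sample_evidence_for_candidate_py; infer_instance

-- ===== CLAIM (what is proved, stated in full; the proofs are below) =====
def Claim_equal_sample_evidence_for_candidate_py : Prop := ∀ (group_nodes : List (List (String × String))) (adjacency : List (String × List String)), Dom_sample_evidence_for_candidate_py group_nodes adjacency → Spec_sample_evidence_for_candidate_py group_nodes adjacency (sample_evidence_for_candidate_py group_nodes adjacency)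

-- ===== LEMMAS AND PROOFS =====

-- full (no-cutoff) dedup, recursion form of A's second pass
def pvDedup (l : List String) (seen : PySem.Set String) (res : List String) : List String :=
  match l with
  | [] => res
  | c :: rest =>
    if PySem.Set.contains seen c then pvDedup rest seen res
    else pvDedup rest (PySem.Set.add seen c) (res ++ [c])

-- A's inner neighbor loop produces exactly B's filtered/mapped neighbor candidates
theorem pvInnerFold (l : List String) (acc : List String) :
    l.foldl (fun e n => if n ≠ "" then e ++ ["关联节点：" ++ n] else e) acc
      = acc ++ ((l.filter (fun n => n ≠ "")).map (fun n => "关联节点：" ++ n)) := by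
  induction l generalizing acc with
  | nil => simp
  | cons c rest ih =>
    rw [List.foldl_cons, ih, List.filter_cons]
    by_cases h : c = "" <;> simp [h]

-- A's evidence list is the concatenation of B's per-node candidate lists
theorem pvEvidence_flatMap (gn : List (List (String × String))) (adj : List (String × List String))
    (acc : List String) :
    gn.foldl (fun ev node =>
      let summary := pvSummary node
      let ev := if summary ≠ "" then ev ++ [summary] else ev
      ((PySem.Dict.mk adj).getD (pvKey node) []).foldl (fun e n =>
        if n ≠ "" then e ++ ["关联节点：" ++ n] else e) ev) acc
      = acc ++ gn.flatMap (fun node => pvCandidates node adj) := by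
  induction gn generalizing acc with
  | nil => simp
  | cons node rest ih =>
    simp only [List.foldl_cons, List.flatMap_cons]
    rw [ih, pvInnerFold, pvCandidates]
    by_cases h : pvSummary node = "" <;> simp [h, List.append_assoc]

-- A's dedup fold equals the recursive pvDedup
theorem pvDedup_foldl (l : List String) (seen : PySem.Set String) (res : List String) :
    (l.foldl (fun (p : List String × PySem.Set String) item =>
      if PySem.Set.contains p.2 item then p
      else (p.1 ++ [item], PySem.Set.add p.2 item)) (res, seen)).1 = pvDedup l seen res := by
  induction l generalizing seen res with
  | nil => rfl
  | cons c rest ih =>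
    simp only [List.foldl_cons, pvDedup]
    by_cases h : PySem.Set.contains seen c = true
    · rw [if_pos h, if_pos h]; exact ih _ _
    · rw [if_neg h, if_neg h]; exact ih _ _

-- pvDedup only ever extends the accumulator
theorem pvDedup_prefix (l : List String) (seen : PySem.Set String) (res : List String) :
    ∃ t, pvDedup l seen res = res ++ t := by
  induction l generalizing seen res with
  | nil => exact ⟨[], by simp [pvDedup]⟩
  | cons c rest ih =>
    simp only [pvDedup]
    by_cases h : PySem.Set.contains seen c = true
    · rw [if_pos h]; exact ih _ _
    · rw [if_neg h]
      obtain ⟨t, ht⟩ := ih (PySem.Set.add seen c) (res ++ [c])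
      exact ⟨c :: t, by simp [ht]⟩

-- core: the early-terminating dedup = the full dedup followed by take 3
theorem pvTake3_take (l : List String) (seen : PySem.Set String) (res : List String)
    (h : res.length < 3) : (pvTake3 l seen res).1 = (pvDedup l seen res).take 3 := by
  induction l generalizing seen res with
  | nil => simp [pvTake3, pvDedup, List.take_of_length_le (le_of_lt h)]
  | cons c rest ih =>
    simp only [pvTake3, pvDedup]
    by_cases hc : PySem.Set.contains seen c = true
    · rw [if_pos hc, if_pos hc]; exact ih _ _ h
    · rw [if_neg hc, if_neg hc]
      by_cases h3 : (res ++ [c]).length = 3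
      · rw [if_pos h3]
        obtain ⟨t, ht⟩ := pvDedup_prefix rest (PySem.Set.add seen c) (res ++ [c])
        rw [ht, List.take_append_of_le_length (by omega), List.take_of_length_le (by omega)]
      · rw [if_neg h3]
        exact ih _ _ (by simp at h3 ⊢; omega)

-- pvTake3 distributes over append (the early return short-circuits)
theorem pvTake3_append (l1 l2 : List String) (seen : PySem.Set String) (res : List String) :
    pvTake3 (l1 ++ l2) seen res
      = match pvTake3 l1 seen res with
        | (r, s, true) => (r, s, true)
        | (r, s, false) => pvTake3 l2 s r := by
  induction l1 generalizing seen res with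
  | nil => simp [pvTake3]
  | cons c rest ih =>
    simp only [List.cons_append, pvTake3]
    by_cases hc : PySem.Set.contains seen c = true
    · rw [if_pos hc, if_pos hc]; exact ih _ _
    · rw [if_neg hc, if_neg hc]
      by_cases h3 : (res ++ [c]).length = 3
      · rw [if_pos h3, if_pos h3]
      · rw [if_neg h3, if_neg h3]; exact ih _ _

-- B's nested loops equal the single early-terminating dedup over the flattened candidates
theorem pvLoopB_flat (nodes : List (List (String × String))) (adj : List (String × List String))
    (seen : PySem.Set String) (res : List String) :
    pvLoopB nodes adj seen res
      = (pvTake3 (nodes.flatMap (fun node => pvCandidates node adj)) seen res).1 := by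
  induction nodes generalizing seen res with
  | nil => simp [pvLoopB, pvTake3]
  | cons node rest ih =>
    simp only [pvLoopB, List.flatMap_cons]
    rw [pvTake3_append]
    rcases hp : pvTake3 (pvCandidates node adj) seen res with ⟨r, s, flag⟩
    cases flag <;> simp [ih]

-- ===== VERDICT (by name: the statement is the Claim_ definition above) =====
theorem sample_evidence_for_candidate_py_spec : Claim_equal_sample_evidence_for_candidate_py := by
  intro gn adj _
  unfold Spec_sample_evidence_for_candidate_py
  simp only [sample_evidence_for_candidate_py, sample_evidence_for_candidate_py_alt]
  rw [pvEvidence_flatMap, pvDedup_foldl, pvLoopB_flat,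
    pvTake3_take _ _ _ (by simp), List.nil_append]
  simp [pysem]
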